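-- pv_equiv track=rewrite | github.com/EstebanMontelongo/CPSC-481-Final-Project | chess.py | remove_attacking_queens
-- ===== SOURCE A (Python) =====
-- def remove_attacking_queens(state, table_size):
--     state_copy = state.copy()
--     for row in range(table_size):
--         col = state[row]
--         safe = True
--         for row2 in range(row, table_size):
--             # skip itself, since it can't attack itself
--             if row2 == row:
--                 continue
--             col2 = state[row2]
--             # checks is other queens are under attack, if so remove the current queen
--             if col == col2 or abs(row - row2) == abs(col - col2):
--                 state_copy[row] = -1
--     return state_copy
-- ===== SOURCE B (Python) =====
-- def remove_attacking_queens(state, table_size):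
--     result = state.copy()
--     cols, diags, antis = set(), set(), set()
--     for row in range(table_size - 1, -1, -1):
--         col = state[row]
--         if col in cols or (row - col) in diags or (row + col) in antis:
--             result[row] = -1
--         cols.add(col)
--         diags.add(row - col)
--         antis.add(row + col)
--     return result
-- ===== Notes on version B (the rewrite author's own statement) =====
-- stated objective: faster
-- what changed: Replaced the nested later-row scan per queen with a single backward pass that maintains sets of seen columns, diagonals and anti-diagonals.
import Mathlib
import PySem

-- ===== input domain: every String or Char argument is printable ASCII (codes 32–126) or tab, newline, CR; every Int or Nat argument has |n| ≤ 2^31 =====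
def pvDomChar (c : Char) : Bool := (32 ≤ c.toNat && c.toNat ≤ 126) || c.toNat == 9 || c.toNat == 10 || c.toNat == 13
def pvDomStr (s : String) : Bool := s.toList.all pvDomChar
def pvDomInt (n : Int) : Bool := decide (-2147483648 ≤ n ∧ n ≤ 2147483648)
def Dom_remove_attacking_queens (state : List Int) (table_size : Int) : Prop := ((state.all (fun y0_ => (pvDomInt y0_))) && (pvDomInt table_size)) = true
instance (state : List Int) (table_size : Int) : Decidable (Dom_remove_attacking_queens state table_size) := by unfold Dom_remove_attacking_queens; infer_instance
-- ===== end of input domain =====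

-- B replaces A's quadratic per-queen scan of later rows by one backward pass with
-- sets of seen columns / diagonals / anti-diagonals (objective: faster, O(n^2) → O(n)).

-- ===== PORT A =====
def remove_attacking_queens (state : List Int) (table_size : Int) : List Int :=
  (PySem.List.pyRange 0 table_size 1).foldl (fun state_copy row =>
    let col := PySem.List.pyGetD state row 0
    (PySem.List.pyRange row table_size 1).foldl (fun sc row2 =>
      if row2 == row then sc
      else
        let col2 := PySem.List.pyGetD state row2 0
        if col == col2 || (row - row2).natAbs == (col - col2).natAbs then
          PySem.List.pySetD sc row (-1)
        else sc) state_copy) state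

-- ===== PORT B =====
def remove_attacking_queens_alt (state : List Int) (table_size : Int) : List Int :=
  ((PySem.List.pyRange (table_size - 1) (-1) (-1)).foldl
    (fun (acc : List Int × PySem.Set Int × PySem.Set Int × PySem.Set Int) row =>
      let col := PySem.List.pyGetD state row 0
      let result := if PySem.Set.contains acc.2.1 col
                      || PySem.Set.contains acc.2.2.1 (row - col)
                      || PySem.Set.contains acc.2.2.2 (row + col)
                    then PySem.List.pySetD acc.1 row (-1) else acc.1
      (result, PySem.Set.add acc.2.1 col, PySem.Set.add acc.2.2.1 (row - col),
        PySem.Set.add acc.2.2.2 (row + col)))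
    (state, PySem.Set.empty, PySem.Set.empty, PySem.Set.empty)).1

-- ===== PRECONDITION & SPEC =====
-- Pre_: Python A indexes state[row] for every row in range(table_size), so it raises
-- IndexError exactly when table_size > len(state); those inputs are excluded.
def Pre_remove_attacking_queens (state : List Int) (table_size : Int) : Prop :=
  table_size ≤ (state.length : Int)
instance (state : List Int) (table_size : Int) : Decidable (Pre_remove_attacking_queens state table_size) := by unfold Pre_remove_attacking_queens; infer_instance

def pvWitness_remove_attacking_queens : List Int × Int := ([0, 2, 1], 3)

def Spec_remove_attacking_queens (state : List Int) (table_size : Int) (out : List Int) : Prop := out = remove_attacking_queens_alt state table_size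
instance (state : List Int) (table_size : Int) (out : List Int) : Decidable (Spec_remove_attacking_queens state table_size out) := by unfold Spec_remove_attacking_queens; infer_instance

-- ===== CLAIM (what is proved, stated in full; the proofs are below) =====
def Claim_equal_remove_attacking_queens : Prop := ∀ (state : List Int) (table_size : Int), Dom_remove_attacking_queens state table_size → Pre_remove_attacking_queens state table_size → Spec_remove_attacking_queens state table_size (remove_attacking_queens state table_size)

-- ===== LEMMAS AND PROOFS =====

-- "queen in row `row` is attacked by a queen in a strictly later row < ts", as A tests it
def attA (state : List Int) (ts row : Int) : Bool :=
  (PySem.List.pyRange row ts 1).any (fun r2 =>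
    !(r2 == row) &&
      (PySem.List.pyGetD state row 0 == PySem.List.pyGetD state r2 0
        || (row - r2).natAbs == (PySem.List.pyGetD state row 0 - PySem.List.pyGetD state r2 0).natAbs))

lemma attA_iff (state : List Int) (ts row : Int) :
    attA state ts row = true ↔
      ∃ r2 : Int, row < r2 ∧ r2 < ts ∧
        (PySem.List.pyGetD state row 0 = PySem.List.pyGetD state r2 0 ∨
          (row - r2).natAbs = (PySem.List.pyGetD state row 0 - PySem.List.pyGetD state r2 0).natAbs) := by
  simp only [attA, List.any_eq_true, PySem.List.mem_pyRange_one, Bool.and_eq_true,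
    Bool.not_eq_eq_eq_not, Bool.not_true, beq_eq_false_iff_ne, ne_eq, Bool.or_eq_true, beq_iff_eq]
  constructor
  · rintro ⟨r2, ⟨h1, h2⟩, h3, h4⟩
    exact ⟨r2, by omega, h2, h4⟩
  · rintro ⟨r2, h1, h2, h3⟩
    exact ⟨r2, ⟨by omega, h2⟩, by omega, h3⟩

-- inner loop of A: mark index `row` once iff any later row attacks
lemma foldl_mark (l : List Int) (row : Int) (hrow : 0 ≤ row) (p : Int → Bool) (sc : List Int) :
    l.foldl (fun sc r2 => if r2 == row then sc else
        if p r2 then PySem.List.pySetD sc row (-1) else sc) sc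
      = if l.any (fun r2 => !(r2 == row) && p r2) then sc.set row.toNat (-1) else sc := by
  have hset : ∀ l : List Int, PySem.List.pySetD l row (-1) = l.set row.toNat (-1) :=
    fun l => PySem.List.pySetD_of_nonneg l (-1) hrow
  induction l generalizing sc with
  | nil => simp
  | cons r tl ih =>
    simp only [List.foldl_cons, List.any_cons]
    by_cases hr : (r == row) = true
    · rw [if_pos hr, ih]
      have hb : (!(r == row) && p r) = false := by simp [hr]
      simp only [hb, Bool.false_or]
    · rw [if_neg hr]
      by_cases hp : p r = true
      · rw [if_pos hp, ih, hset]
        have hb : (!(r == row) && p r) = true := by simp_all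
        simp only [hb, Bool.true_or]
        split
        · simp [List.set_set]
        · simp
      · rw [if_neg hp, ih]
        have hb : (!(r == row) && p r) = false := by simp_all
        simp only [hb, Bool.false_or]

-- outer loop of A, pointwise
lemma markFold_spec (g : Int → Bool) (b : Int) :
    ∀ (n : Nat) (a : Int) (sc : List Int), (b - a).toNat = n → 0 ≤ a → b ≤ (sc.length : Int) →
      ∀ j : Nat,
        ((PySem.List.pyRange a b 1).foldl
            (fun sc row => if g row then sc.set row.toNat (-1) else sc) sc)[j]? =
          if a ≤ (j : Int) ∧ (j : Int) < b ∧ g (j : Int) then some (-1) else sc[j]? := by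
  intro n
  induction n with
  | zero =>
    intro a sc hn ha hb j
    rw [PySem.List.pyRange_one_eq_nil (by omega)]
    simp only [List.foldl_nil]
    rw [if_neg (by omega)]
  | succ n ih =>
    intro a sc hn ha hb j
    have hab : a < b := by omega
    rw [PySem.List.pyRange_one_cons hab]
    simp only [List.foldl_cons]
    have hlen : (if g a then sc.set a.toNat (-1) else sc).length = sc.length := by
      split <;> simp
    rw [ih (a + 1) _ (by omega) (by omega) (by rw [hlen]; exact hb) j]
    by_cases hj : (j : Int) = a
    · have hjn : j = a.toNat := by omega
      rw [hj]
      by_cases hg : g a = true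
      · rw [if_neg (by omega), if_pos hg, hjn, List.getElem?_set_self (by omega),
          if_pos ⟨le_refl a, hab, hg⟩]
      · rw [if_neg (by simp [hg]), if_neg hg, if_neg (by simp [hg])]
    · have hne : a.toNat ≠ j := by omega
      have hstep : (if g a then sc.set a.toNat (-1) else sc)[j]? = sc[j]? := by
        split
        · exact List.getElem?_set_ne hne
        · rfl
      rw [hstep]
      by_cases hc : a + 1 ≤ (j : Int) ∧ (j : Int) < b ∧ g (j : Int) = true
      · rw [if_pos hc, if_pos ⟨by omega, hc.2⟩]
      · rw [if_neg hc, if_neg (fun hcc => hc ⟨by omega, hcc.2⟩)]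

-- B's step function (identical to the lambda in the port)
def bstep (state : List Int) (acc : List Int × PySem.Set Int × PySem.Set Int × PySem.Set Int)
    (row : Int) : List Int × PySem.Set Int × PySem.Set Int × PySem.Set Int :=
  let col := PySem.List.pyGetD state row 0
  let result := if PySem.Set.contains acc.2.1 col
                  || PySem.Set.contains acc.2.2.1 (row - col)
                  || PySem.Set.contains acc.2.2.2 (row + col)
                then PySem.List.pySetD acc.1 row (-1) else acc.1
  (result, PySem.Set.add acc.2.1 col, PySem.Set.add acc.2.2.1 (row - col),
    PySem.Set.add acc.2.2.2 (row + col))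

-- B's backward pass in foldr form, with the full invariant
lemma bfold_spec (state : List Int) (ts : Int) (hts : ts ≤ (state.length : Int)) :
    ∀ (n : Nat) (a : Int), (ts - a).toNat = n → 0 ≤ a →
      (∀ j : Nat,
        ((PySem.List.pyRange a ts 1).foldr (fun x acc => bstep state acc x)
            (state, PySem.Set.empty, PySem.Set.empty, PySem.Set.empty)).1[j]? =
          if a ≤ (j : Int) ∧ (j : Int) < ts ∧ attA state ts (j : Int) then some (-1) else state[j]?) ∧
      (((PySem.List.pyRange a ts 1).foldr (fun x acc => bstep state acc x)
            (state, PySem.Set.empty, PySem.Set.empty, PySem.Set.empty)).1.length = state.length) ∧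
      (∀ c : Int,
        c ∈ ((PySem.List.pyRange a ts 1).foldr (fun x acc => bstep state acc x)
            (state, PySem.Set.empty, PySem.Set.empty, PySem.Set.empty)).2.1 ↔
          ∃ r : Int, a ≤ r ∧ r < ts ∧ PySem.List.pyGetD state r 0 = c) ∧
      (∀ c : Int,
        c ∈ ((PySem.List.pyRange a ts 1).foldr (fun x acc => bstep state acc x)
            (state, PySem.Set.empty, PySem.Set.empty, PySem.Set.empty)).2.2.1 ↔
          ∃ r : Int, a ≤ r ∧ r < ts ∧ r - PySem.List.pyGetD state r 0 = c) ∧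
      (∀ c : Int,
        c ∈ ((PySem.List.pyRange a ts 1).foldr (fun x acc => bstep state acc x)
            (state, PySem.Set.empty, PySem.Set.empty, PySem.Set.empty)).2.2.2 ↔
          ∃ r : Int, a ≤ r ∧ r < ts ∧ r + PySem.List.pyGetD state r 0 = c) := by
  intro n
  induction n with
  | zero =>
    intro a hn ha
    rw [PySem.List.pyRange_one_eq_nil (by omega)]
    simp only [List.foldr_nil]
    have hempty : ∀ (f : Int → Int) (c : Int),
        c ∈ (PySem.Set.empty : PySem.Set Int) ↔ ∃ r : Int, a ≤ r ∧ r < ts ∧ f r = c := by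
      intro f c
      constructor
      · intro h; exact absurd h (List.not_mem_nil)
      · rintro ⟨r, h1, h2, _⟩; omega
    refine ⟨?_, ?_, ?_, ?_, ?_⟩
    · intro j
      rw [if_neg (by omega)]
    · trivial
    · exact hempty (fun r => PySem.List.pyGetD state r 0)
    · exact hempty (fun r => r - PySem.List.pyGetD state r 0)
    · exact hempty (fun r => r + PySem.List.pyGetD state r 0)
  | succ n ih =>
    intro a hn ha
    rw [PySem.List.pyRange_one_cons (by omega)]
    simp only [List.foldr_cons]
    obtain ⟨hres, hlen, hcols, hdiags, hantis⟩ := ih (a + 1) (by omega) (by omega)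
    set acc := (PySem.List.pyRange (a + 1) ts 1).foldr (fun x acc => bstep state acc x)
      (state, PySem.Set.empty, PySem.Set.empty, PySem.Set.empty) with hacc
    have hcond : (PySem.Set.contains acc.2.1 (PySem.List.pyGetD state a 0)
        || PySem.Set.contains acc.2.2.1 (a - PySem.List.pyGetD state a 0)
        || PySem.Set.contains acc.2.2.2 (a + PySem.List.pyGetD state a 0)) = attA state ts a := by
      rw [Bool.eq_iff_iff]
      simp only [Bool.or_eq_true, PySem.Set.contains_iff, attA_iff]
      constructor
      · rintro ((h | h) | h)
        · obtain ⟨r, h1, h2, h3⟩ := (hcols _).mp h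
          exact ⟨r, by omega, h2, by omega⟩
        · obtain ⟨r, h1, h2, h3⟩ := (hdiags _).mp h
          exact ⟨r, by omega, h2, by omega⟩
        · obtain ⟨r, h1, h2, h3⟩ := (hantis _).mp h
          exact ⟨r, by omega, h2, by omega⟩
      · rintro ⟨r2, h1, h2, h3 | h3⟩
        · exact Or.inl (Or.inl ((hcols _).mpr ⟨r2, by omega, h2, h3.symm⟩))
        · have h4 : a - r2 = (PySem.List.pyGetD state a 0 - PySem.List.pyGetD state r2 0) ∨
              a - r2 = -(PySem.List.pyGetD state a 0 - PySem.List.pyGetD state r2 0) := by omega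
          rcases h4 with h4 | h4
          · exact Or.inl (Or.inr ((hdiags _).mpr ⟨r2, by omega, h2, by omega⟩))
          · exact Or.inr ((hantis _).mpr ⟨r2, by omega, h2, by omega⟩)
    simp only [bstep]
    simp only [hcond]
    refine ⟨?_, ?_, ?_, ?_, ?_⟩
    · intro j
      by_cases hg : attA state ts a = true
      · rw [if_pos hg, PySem.List.pySetD_of_nonneg acc.1 (-1) ha]
        by_cases hj : (j : Int) = a
        · have hjn : j = a.toNat := by omega
          have hlt : a.toNat < acc.1.length := by omega
          rw [hjn, List.getElem?_set_self hlt, if_pos ⟨by omega, by omega, by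
            rw [show ((a.toNat : Nat) : Int) = a by omega]; exact hg⟩]
        · rw [List.getElem?_set_ne (by omega), hres j]
          by_cases hc : a + 1 ≤ (j : Int) ∧ (j : Int) < ts ∧ attA state ts j = true
          · rw [if_pos hc, if_pos ⟨by omega, hc.2⟩]
          · rw [if_neg hc, if_neg (fun hcc => hc ⟨by omega, hcc.2⟩)]
      · rw [if_neg hg, hres j]
        by_cases hj : (j : Int) = a
        · rw [if_neg (by omega), if_neg (fun hcc => hg (hj ▸ hcc.2.2))]
        · by_cases hc : a + 1 ≤ (j : Int) ∧ (j : Int) < ts ∧ attA state ts j = true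
          · rw [if_pos hc, if_pos ⟨by omega, hc.2⟩]
          · rw [if_neg hc, if_neg (fun hcc => hc ⟨by omega, hcc.2⟩)]
    · split
      · rw [PySem.List.pySetD_of_nonneg acc.1 (-1) ha, List.length_set]; exact hlen
      · exact hlen
    · intro c
      simp only [PySem.Set.mem_add]
      constructor
      · rintro (h | rfl)
        · obtain ⟨r, h1, h2, h3⟩ := (hcols c).mp h
          exact ⟨r, by omega, h2, h3⟩
        · exact ⟨a, le_refl a, by omega, rfl⟩
      · rintro ⟨r, h1, h2, h3⟩
        by_cases hra : r = a
        · subst hra; exact Or.inr h3.symm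
        · exact Or.inl ((hcols c).mpr ⟨r, by omega, h2, h3⟩)
    · intro c
      simp only [PySem.Set.mem_add]
      constructor
      · rintro (h | rfl)
        · obtain ⟨r, h1, h2, h3⟩ := (hdiags c).mp h
          exact ⟨r, by omega, h2, h3⟩
        · exact ⟨a, le_refl a, by omega, rfl⟩
      · rintro ⟨r, h1, h2, h3⟩
        by_cases hra : r = a
        · subst hra; exact Or.inr h3.symm
        · exact Or.inl ((hdiags c).mpr ⟨r, by omega, h2, h3⟩)
    · intro c
      simp only [PySem.Set.mem_add]
      constructor
      · rintro (h | rfl)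
        · obtain ⟨r, h1, h2, h3⟩ := (hantis c).mp h
          exact ⟨r, by omega, h2, h3⟩
        · exact ⟨a, le_refl a, by omega, rfl⟩
      · rintro ⟨r, h1, h2, h3⟩
        by_cases hra : r = a
        · subst hra; exact Or.inr h3.symm
        · exact Or.inl ((hantis c).mpr ⟨r, by omega, h2, h3⟩)

lemma alt_eq_bfold (state : List Int) (ts : Int) :
    remove_attacking_queens_alt state ts =
      ((PySem.List.pyRange 0 ts 1).foldr (fun x acc => bstep state acc x)
        (state, PySem.Set.empty, PySem.Set.empty, PySem.Set.empty)).1 := by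
  have h1 : PySem.List.pyRange (ts - 1) (-1) (-1) = (PySem.List.pyRange 0 ts 1).reverse := by
    rw [PySem.List.pyRange_neg_one_eq_reverse]
    norm_num
  rw [remove_attacking_queens_alt, h1, List.foldl_reverse]
  rfl

-- ===== VERDICT (by name: the statement is the Claim_ definition above) =====
theorem remove_attacking_queens_spec : Claim_equal_remove_attacking_queens := by
  intro state ts _dom hpre
  have hpre' : ts ≤ (state.length : Int) := hpre
  unfold Spec_remove_attacking_queens
  have hA : remove_attacking_queens state ts =
      (PySem.List.pyRange 0 ts 1).foldl
        (fun sc row => if attA state ts row then sc.set row.toNat (-1) else sc) state := by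
    simp only [remove_attacking_queens]
    apply PySem.List.foldl_congr_mem
    intro sc row hmem
    have hrow : 0 ≤ row := by
      have := (PySem.List.mem_pyRange_one).mp hmem
      omega
    rw [foldl_mark _ row hrow]
    rfl
  rw [hA, alt_eq_bfold state ts]
  apply List.ext_getElem?
  intro j
  rw [markFold_spec (fun row => attA state ts row) ts ((ts - 0).toNat) 0 state rfl
      (le_refl 0) hpre' j,
    (bfold_spec state ts hpre' ((ts - 0).toNat) 0 rfl (le_refl 0)).1 j]
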